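-- pv_equiv track=rewrite | github.com/F-0728/Mahjong | MDP.py | ko_tsumo_kaburi_2
-- ===== SOURCE A (Python) =====
-- def ko_tsumo_kaburi_2(sc):
--   base = [1500, 2000, 2700, 3200, 4000, 4700]
--   tsu = [700, 1000, 1300, 1600, 2000, 2300]
--   tsu_p = [base[i] + tsu[i] for i in range(6)]
--   fu = ["20", "30", "40", "50", "60", "70"]
--   for i in range(6):
--     if tsu_p[i] >= sc:
--       return "2飜{}符".format(fu[i])
-- ===== SOURCE B (Python) =====
-- import bisect
--
-- def ko_tsumo_kaburi_2(sc):
--   thresholds = [2200, 3000, 4000, 4800, 6000, 7000]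
--   fu = ["20", "30", "40", "50", "60", "70"]
--   i = bisect.bisect_left(thresholds, sc)
--   if i < 6:
--     return "2\u98dc{}\u7b26".format(fu[i])
--   return None
-- ===== Notes on version B (the rewrite author's own statement) =====
-- stated objective: idiomatic
-- what changed: Replaces the per-index linear scan over elementwise-summed base/tsu lists with a precomputed threshold table and bisect_left binary search for the leftmost threshold >= sc.
import Mathlib
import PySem

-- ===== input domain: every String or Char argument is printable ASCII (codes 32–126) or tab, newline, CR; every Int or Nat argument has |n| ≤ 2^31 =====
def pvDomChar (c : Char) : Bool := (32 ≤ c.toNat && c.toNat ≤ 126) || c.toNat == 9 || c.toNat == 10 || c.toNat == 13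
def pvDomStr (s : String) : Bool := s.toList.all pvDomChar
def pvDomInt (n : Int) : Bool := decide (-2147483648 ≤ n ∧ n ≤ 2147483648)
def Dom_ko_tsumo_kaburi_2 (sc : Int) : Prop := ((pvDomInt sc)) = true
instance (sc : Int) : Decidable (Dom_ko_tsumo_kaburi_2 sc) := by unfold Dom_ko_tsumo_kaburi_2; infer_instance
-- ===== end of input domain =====

-- B replaces A's linear scan over elementwise-summed lists with a precomputed
-- threshold table and a bisect_left binary search (idiomatic; same cost at n = 6).

-- ===== PORT A =====
-- the for-loop with early return: scan indices, return at first tsu_p[i] >= sc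
def koLoopA (sc : Int) (tsu_p : List Int) (fu : List String) : List Int → Option String
  | [] => none
  | i :: rest =>
    if PySem.List.pyGetD tsu_p i 0 ≥ sc then
      some ("2飜" ++ PySem.List.pyGetD fu i "" ++ "符")
    else koLoopA sc tsu_p fu rest

def ko_tsumo_kaburi_2 (sc : Int) : Option String :=
  let base : List Int := [1500, 2000, 2700, 3200, 4000, 4700]
  let tsu : List Int := [700, 1000, 1300, 1600, 2000, 2300]
  -- indices of the comprehension are all in range, so pyGetD is exact here
  let tsu_p : List Int :=
    (PySem.List.pyRange 0 6 1).map
      (fun i => PySem.List.pyGetD base i 0 + PySem.List.pyGetD tsu i 0)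
  let fu : List String := ["20", "30", "40", "50", "60", "70"]
  koLoopA sc tsu_p fu (PySem.List.pyRange 0 6 1)

-- ===== PORT B =====
-- bisect.bisect_left on a list of Ints (standard halving search)
def bisectLeft (xs : List Int) (x : Int) (lo hi : Nat) : Nat :=
  if h : lo < hi then
    let mid := (lo + hi) / 2
    if xs.getD mid 0 < x then bisectLeft xs x (mid + 1) hi
    else bisectLeft xs x lo mid
  else lo
termination_by hi - lo
decreasing_by all_goals omega

def ko_tsumo_kaburi_2_alt (sc : Int) : Option String :=
  let thresholds : List Int := [2200, 3000, 4000, 4800, 6000, 7000]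
  let fu : List String := ["20", "30", "40", "50", "60", "70"]
  let i := bisectLeft thresholds sc 0 thresholds.length
  if i < 6 then some ("2飜" ++ fu.getD i "" ++ "符")
  else none

-- ===== PRECONDITION & SPEC =====
def Spec_ko_tsumo_kaburi_2 (sc : Int) (out : Option String) : Prop := out = ko_tsumo_kaburi_2_alt sc
instance (sc : Int) (out : Option String) : Decidable (Spec_ko_tsumo_kaburi_2 sc out) := by unfold Spec_ko_tsumo_kaburi_2; infer_instance

-- ===== CLAIM (what is proved, stated in full; the proofs are below) =====
def Claim_equal_ko_tsumo_kaburi_2 : Prop := ∀ (sc : Int), Dom_ko_tsumo_kaburi_2 sc → Spec_ko_tsumo_kaburi_2 sc (ko_tsumo_kaburi_2 sc)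

-- ===== LEMMAS AND PROOFS =====

-- evaluation of the binary search on the concrete 6-threshold table
theorem bl6 (x : Int) : bisectLeft [2200,3000,4000,4800,6000,7000] x 0 6 =
    if 4800 < x then (if 7000 < x then 6 else if 6000 < x then 5 else 4)
    else if 3000 < x then (if 4000 < x then 3 else 2)
    else if 2200 < x then 1 else 0 := by
  rw [bisectLeft]; norm_num
  split_ifs with h1 h2 h3 h4 h5 <;>
      (repeat (rw [bisectLeft]; norm_num)) <;>
      (first | rfl | omega | (split_ifs <;> omega))

-- ===== VERDICT (by name: the statement is the Claim_ definition above) =====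
theorem ko_tsumo_kaburi_2_spec : Claim_equal_ko_tsumo_kaburi_2 := by
  intro sc _
  unfold Spec_ko_tsumo_kaburi_2 ko_tsumo_kaburi_2 ko_tsumo_kaburi_2_alt
  have hr : PySem.List.pyRange 0 6 1 = [0,1,2,3,4,5] := by decide
  have hm : (([0,1,2,3,4,5] : List Int).map
      (fun i => PySem.List.pyGetD ([1500, 2000, 2700, 3200, 4000, 4700] : List Int) i 0
              + PySem.List.pyGetD ([700, 1000, 1300, 1600, 2000, 2300] : List Int) i 0))
      = [2200,3000,4000,4800,6000,7000] := by decide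
  simp only [hr, hm, List.length_cons, List.length_nil]
  rw [show ((5:Nat)+1) = 6 from rfl, bl6]
  simp only [koLoopA]
  have g0 : PySem.List.pyGetD ([2200,3000,4000,4800,6000,7000] : List Int) 0 0 = 2200 := by decide
  have g1 : PySem.List.pyGetD ([2200,3000,4000,4800,6000,7000] : List Int) 1 0 = 3000 := by decide
  have g2 : PySem.List.pyGetD ([2200,3000,4000,4800,6000,7000] : List Int) 2 0 = 4000 := by decide
  have g3 : PySem.List.pyGetD ([2200,3000,4000,4800,6000,7000] : List Int) 3 0 = 4800 := by decide
  have g4 : PySem.List.pyGetD ([2200,3000,4000,4800,6000,7000] : List Int) 4 0 = 6000 := by decide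
  have g5 : PySem.List.pyGetD ([2200,3000,4000,4800,6000,7000] : List Int) 5 0 = 7000 := by decide
  simp only [g0, g1, g2, g3, g4, g5]
  norm_num [PySem.List.pyGetD, PySem.List.pyIdx?]
  split_ifs <;> first | rfl | omega
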